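-- pv_equiv track=rewrite | github.com/iwolf81/beascout | src/core/unit_identifier.py | _normalize_town_name
-- ===== SOURCE A (Python) =====
-- def _normalize_town_name(town: str) -> str:
--     """
--     Normalize town name to canonical form
--     Handles common variations and aliases
--     """
--     if not town:
--         return ""
--
--     # Handle common abbreviations and variations
--     town_map = {
--         # Standard abbreviation expansions for HNE towns
--         "E Brookfield": "East Brookfield",
--         "W Brookfield": "West Brookfield",
--         "N Brookfield": "North Brookfield",
--         "W Boylston": "West Boylston",
--
--         # Additional common variations
--         "East Brookfield": "East Brookfield",  # Already correct
--         "West Brookfield": "West Brookfield",  # Already correct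
--         "North Brookfield": "North Brookfield", # Already correct
--         "West Boylston": "West Boylston",      # Already correct
--
--         # Villages with separate ZIP codes - NO MAPPING to parent towns
--         # These are treated as independent HNE towns for unit correlation:
--         # "Fiskdale" stays "Fiskdale" (village within Sturbridge, ZIP 01518)
--         # "Jefferson" stays "Jefferson" (village within Holden, ZIP 01522)
--         # "Whitinsville" stays "Whitinsville" (village within Northbridge, ZIP 01588)
--         # This preserves village identity while maintaining HNE territory recognition
--     }
--
--     # Direct mapping first
--     if town in town_map:
--         return town_map[town]
--
--     # Handle case variations
--     for variant, canonical in town_map.items():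
--         if town.lower() == variant.lower():
--             return canonical
--
--     return town
-- ===== SOURCE B (Python) =====
-- # Parse "<direction> <base>" by suffix instead of a table of full variant names.
-- _BROOKFIELD_DIR = {
--     "e": "East Brookfield",
--     "east": "East Brookfield",
--     "w": "West Brookfield",
--     "west": "West Brookfield",
--     "n": "North Brookfield",
--     "north": "North Brookfield",
-- }
--
--
-- def _normalize_town_name(town: str) -> str:
--     """Normalize town name: recognise a direction prefix before a known base town."""
--     if not town:
--         return ""
--     low = town.lower()
--     if low.endswith(" brookfield"):
--         return _BROOKFIELD_DIR.get(low[:len(low) - 11], town)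
--     if low.endswith(" boylston"):
--         p = low[:len(low) - 9]
--         if p == "w" or p == "west":
--             return "West Boylston"
--     return town
-- ===== Notes on version B (the rewrite author's own statement) =====
-- stated objective: alternative
-- what changed: Instead of matching the whole name against a table of full variant names (exact branch plus a case-insensitive scan), B parses the lowercased name as a direction prefix followed by a known base-town suffix (' brookfield' / ' boylston') and canonicalises the prefix.
import Mathlib
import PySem

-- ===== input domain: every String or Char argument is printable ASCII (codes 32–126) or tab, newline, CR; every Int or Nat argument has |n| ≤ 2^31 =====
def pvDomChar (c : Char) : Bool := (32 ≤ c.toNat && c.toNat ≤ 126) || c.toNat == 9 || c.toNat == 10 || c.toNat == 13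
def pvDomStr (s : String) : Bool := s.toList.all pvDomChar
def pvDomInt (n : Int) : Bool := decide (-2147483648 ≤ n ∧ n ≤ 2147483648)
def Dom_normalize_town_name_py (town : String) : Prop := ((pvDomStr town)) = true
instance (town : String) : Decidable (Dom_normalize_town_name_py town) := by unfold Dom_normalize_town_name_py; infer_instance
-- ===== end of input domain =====

-- B parses the lowercased name as a direction prefix before a known base-town suffix
-- (' brookfield' / ' boylston') instead of matching whole names against an alias table
-- (objective: alternative).


-- ===== PORT A =====
def townMapA : PySem.Dict String String := PySem.Dict.ofList
  [("E Brookfield", "East Brookfield"),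
   ("W Brookfield", "West Brookfield"),
   ("N Brookfield", "North Brookfield"),
   ("W Boylston", "West Boylston"),
   ("East Brookfield", "East Brookfield"),
   ("West Brookfield", "West Brookfield"),
   ("North Brookfield", "North Brookfield"),
   ("West Boylston", "West Boylston")]

-- the 'for variant, canonical in town_map.items()' loop with early return
def caseLoopA (town : String) : List (String × String) → Option String
  | [] => none
  | (variant, canonical) :: rest =>
      if PySem.Str.lower town == PySem.Str.lower variant then some canonical
      else caseLoopA town rest

def normalize_town_name_py (town : String) : String :=
  if town = "" then ""
  else if townMapA.contains town then (townMapA.get? town).getD town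
  else
    match caseLoopA town townMapA.items with
    | some canonical => canonical
    | none => town

-- ===== PORT B =====
def brookfieldDirB : PySem.Dict String String := PySem.Dict.ofList
  [("e", "East Brookfield"),
   ("east", "East Brookfield"),
   ("w", "West Brookfield"),
   ("west", "West Brookfield"),
   ("n", "North Brookfield"),
   ("north", "North Brookfield")]

def normalize_town_name_py_alt (town : String) : String :=
  if town = "" then ""
  else
    let low := PySem.Str.lower town
    if PySem.Str.endswith low " brookfield" then
      (brookfieldDirB.get? (PySem.Str.slice low none (some (PySem.Str.len low - 11)))).getD town
    else if PySem.Str.endswith low " boylston" then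
      let p := PySem.Str.slice low none (some (PySem.Str.len low - 9))
      if p = "w" ∨ p = "west" then "West Boylston" else town
    else town

-- ===== PRECONDITION & SPEC =====
def Spec_normalize_town_name_py (town : String) (out : String) : Prop := out = normalize_town_name_py_alt town
instance (town : String) (out : String) : Decidable (Spec_normalize_town_name_py town out) := by unfold Spec_normalize_town_name_py; infer_instance

-- ===== CLAIM =====
def Claim_equal_normalize_town_name_py : Prop := ∀ (town : String), Dom_normalize_town_name_py town → Spec_normalize_town_name_py town (normalize_town_name_py town)

-- ===== LEMMAS AND PROOFS =====
theorem townMapA_eq : townMapA = PySem.Dict.mk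
  [("E Brookfield", "East Brookfield"),
   ("W Brookfield", "West Brookfield"),
   ("N Brookfield", "North Brookfield"),
   ("W Boylston", "West Boylston"),
   ("East Brookfield", "East Brookfield"),
   ("West Brookfield", "West Brookfield"),
   ("North Brookfield", "North Brookfield"),
   ("West Boylston", "West Boylston")] := by decide

theorem brookfieldDirB_eq : brookfieldDirB = PySem.Dict.mk
  [("e", "East Brookfield"),
   ("east", "East Brookfield"),
   ("w", "West Brookfield"),
   ("west", "West Brookfield"),
   ("n", "North Brookfield"),
   ("north", "North Brookfield")] := by decide

theorem lowA1 : PySem.Str.lower "E Brookfield" = "e brookfield" := by decide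
theorem lowA2 : PySem.Str.lower "W Brookfield" = "w brookfield" := by decide
theorem lowA3 : PySem.Str.lower "N Brookfield" = "n brookfield" := by decide
theorem lowA4 : PySem.Str.lower "W Boylston" = "w boylston" := by decide
theorem lowA5 : PySem.Str.lower "East Brookfield" = "east brookfield" := by decide
theorem lowA6 : PySem.Str.lower "West Brookfield" = "west brookfield" := by decide
theorem lowA7 : PySem.Str.lower "North Brookfield" = "north brookfield" := by decide
theorem lowA8 : PySem.Str.lower "West Boylston" = "west boylston" := by decide

theorem mem8_of_contains (town : String) (h : townMapA.contains town = true) :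
    town = "E Brookfield" ∨ town = "W Brookfield" ∨ town = "N Brookfield" ∨
    town = "W Boylston" ∨ town = "East Brookfield" ∨ town = "West Brookfield" ∨
    town = "North Brookfield" ∨ town = "West Boylston" := by
  rw [townMapA_eq] at h
  simp [PySem.Dict.contains] at h
  tauto

theorem sliceSuffix (low : String) (sfx p : List Char) (h : low.toList = p ++ sfx) :
    (PySem.Str.slice low none (some (PySem.Str.len low - (sfx.length : Int)))).toList = p := by
  rw [PySem.Str.toList_slice]
  simp only [PySem.Chars.slice_eq_listSlice, PySem.Str.len_eq, h]
  have hlen : ((p ++ sfx).length : Int) - (sfx.length : Int) = (p.length : Nat) := by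
    rw [List.length_append]
    push_cast
    omega
  rw [hlen, PySem.List.slice_to _ (Int.natCast_nonneg _), Int.toNat_natCast, List.take_left]

theorem getNoneB (q : String) (h1 : q ≠ "e") (h2 : q ≠ "east") (h3 : q ≠ "w")
    (h4 : q ≠ "west") (h5 : q ≠ "n") (h6 : q ≠ "north") :
    brookfieldDirB.get? q = none := by
  rw [brookfieldDirB_eq]
  simp [PySem.Dict.get?, Ne.symm h1, Ne.symm h2, Ne.symm h3, Ne.symm h4, Ne.symm h5, Ne.symm h6]

-- q ≠ k when q.toList = p but low would otherwise be a string the hypotheses exclude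
theorem key_ne (low : String) (sfx p : List Char) (hp : low.toList = p ++ sfx)
    (k full : String) (hk : k.toList ++ sfx = full.toList) (hne : low ≠ full)
    (q : String) (hq : q.toList = p) : q ≠ k := by
  intro he
  apply hne
  apply String.toList_inj.mp
  rw [hp, ← hq, he, hk]

theorem main_eq (town : String) :
    normalize_town_name_py town = normalize_town_name_py_alt town := by
  by_cases h0 : town = ""
  · simp [normalize_town_name_py, normalize_town_name_py_alt, h0]
  · by_cases hc : townMapA.contains town = true
    · rcases mem8_of_contains town hc with h|h|h|h|h|h|h|h <;> subst h <;> decide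
    · rw [townMapA_eq] at hc
      have hc' : ¬("E Brookfield" = town ∨ "W Brookfield" = town ∨ "N Brookfield" = town ∨
          "W Boylston" = town ∨ "East Brookfield" = town ∨ "West Brookfield" = town ∨
          "North Brookfield" = town ∨ "West Boylston" = town) := by
        simpa [PySem.Dict.contains] using hc
      by_cases h1 : PySem.Str.lower town = "e brookfield"
      · have eT : PySem.Str.endswith "e brookfield" " brookfield" = true := by decide
        have gT : brookfieldDirB.get? (PySem.Str.slice "e brookfield" none
            (some (PySem.Str.len "e brookfield" - 11))) = some "East Brookfield" := by decide
        have hB : normalize_town_name_py_alt town = "East Brookfield" := by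
          unfold normalize_town_name_py_alt
          rw [if_neg h0, h1]
          simp only [eT, gT, Option.getD_some, if_true]
        have hA : normalize_town_name_py town = "East Brookfield" := by
          simp [normalize_town_name_py, h0, hc', townMapA_eq, caseLoopA, h1,
            lowA1, lowA2, lowA3, lowA4, lowA5, lowA6, lowA7, lowA8]
        rw [hA, hB]
      by_cases h2 : PySem.Str.lower town = "w brookfield"
      · have eT : PySem.Str.endswith "w brookfield" " brookfield" = true := by decide
        have gT : brookfieldDirB.get? (PySem.Str.slice "w brookfield" none
            (some (PySem.Str.len "w brookfield" - 11))) = some "West Brookfield" := by decide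
        have hB : normalize_town_name_py_alt town = "West Brookfield" := by
          unfold normalize_town_name_py_alt
          rw [if_neg h0, h2]
          simp only [eT, gT, Option.getD_some, if_true]
        have hA : normalize_town_name_py town = "West Brookfield" := by
          simp [normalize_town_name_py, h0, hc', townMapA_eq, caseLoopA, h2,
            lowA1, lowA2, lowA3, lowA4, lowA5, lowA6, lowA7, lowA8]
        rw [hA, hB]
      by_cases h3 : PySem.Str.lower town = "n brookfield"
      · have eT : PySem.Str.endswith "n brookfield" " brookfield" = true := by decide
        have gT : brookfieldDirB.get? (PySem.Str.slice "n brookfield" none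
            (some (PySem.Str.len "n brookfield" - 11))) = some "North Brookfield" := by decide
        have hB : normalize_town_name_py_alt town = "North Brookfield" := by
          unfold normalize_town_name_py_alt
          rw [if_neg h0, h3]
          simp only [eT, gT, Option.getD_some, if_true]
        have hA : normalize_town_name_py town = "North Brookfield" := by
          simp [normalize_town_name_py, h0, hc', townMapA_eq, caseLoopA, h3,
            lowA1, lowA2, lowA3, lowA4, lowA5, lowA6, lowA7, lowA8]
        rw [hA, hB]
      by_cases h4 : PySem.Str.lower town = "w boylston"
      · have eF : PySem.Str.endswith "w boylston" " brookfield" = false := by decide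
        have eT : PySem.Str.endswith "w boylston" " boylston" = true := by decide
        have sT : PySem.Str.slice "w boylston" none (some (PySem.Str.len "w boylston" - 9)) = "w" ∨
            PySem.Str.slice "w boylston" none (some (PySem.Str.len "w boylston" - 9)) = "west" := by decide
        have hB : normalize_town_name_py_alt town = "West Boylston" := by
          unfold normalize_town_name_py_alt
          rw [if_neg h0, h4]
          simp only [eF, eT, if_true, Bool.false_eq_true, if_false, if_pos sT]
        have hA : normalize_town_name_py town = "West Boylston" := by
          simp [normalize_town_name_py, h0, hc', townMapA_eq, caseLoopA, h4,
            lowA1, lowA2, lowA3, lowA4, lowA5, lowA6, lowA7, lowA8]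
        rw [hA, hB]
      by_cases h5 : PySem.Str.lower town = "east brookfield"
      · have eT : PySem.Str.endswith "east brookfield" " brookfield" = true := by decide
        have gT : brookfieldDirB.get? (PySem.Str.slice "east brookfield" none
            (some (PySem.Str.len "east brookfield" - 11))) = some "East Brookfield" := by decide
        have hB : normalize_town_name_py_alt town = "East Brookfield" := by
          unfold normalize_town_name_py_alt
          rw [if_neg h0, h5]
          simp only [eT, gT, Option.getD_some, if_true]
        have hA : normalize_town_name_py town = "East Brookfield" := by
          simp [normalize_town_name_py, h0, hc', townMapA_eq, caseLoopA, h5,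
            lowA1, lowA2, lowA3, lowA4, lowA5, lowA6, lowA7, lowA8]
        rw [hA, hB]
      by_cases h6 : PySem.Str.lower town = "west brookfield"
      · have eT : PySem.Str.endswith "west brookfield" " brookfield" = true := by decide
        have gT : brookfieldDirB.get? (PySem.Str.slice "west brookfield" none
            (some (PySem.Str.len "west brookfield" - 11))) = some "West Brookfield" := by decide
        have hB : normalize_town_name_py_alt town = "West Brookfield" := by
          unfold normalize_town_name_py_alt
          rw [if_neg h0, h6]
          simp only [eT, gT, Option.getD_some, if_true]
        have hA : normalize_town_name_py town = "West Brookfield" := by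
          simp [normalize_town_name_py, h0, hc', townMapA_eq, caseLoopA, h6,
            lowA1, lowA2, lowA3, lowA4, lowA5, lowA6, lowA7, lowA8]
        rw [hA, hB]
      by_cases h7 : PySem.Str.lower town = "north brookfield"
      · have eT : PySem.Str.endswith "north brookfield" " brookfield" = true := by decide
        have gT : brookfieldDirB.get? (PySem.Str.slice "north brookfield" none
            (some (PySem.Str.len "north brookfield" - 11))) = some "North Brookfield" := by decide
        have hB : normalize_town_name_py_alt town = "North Brookfield" := by
          unfold normalize_town_name_py_alt
          rw [if_neg h0, h7]
          simp only [eT, gT, Option.getD_some, if_true]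
        have hA : normalize_town_name_py town = "North Brookfield" := by
          simp [normalize_town_name_py, h0, hc', townMapA_eq, caseLoopA, h7,
            lowA1, lowA2, lowA3, lowA4, lowA5, lowA6, lowA7, lowA8]
        rw [hA, hB]
      by_cases h8 : PySem.Str.lower town = "west boylston"
      · have eF : PySem.Str.endswith "west boylston" " brookfield" = false := by decide
        have eT : PySem.Str.endswith "west boylston" " boylston" = true := by decide
        have sT : PySem.Str.slice "west boylston" none (some (PySem.Str.len "west boylston" - 9)) = "w" ∨
            PySem.Str.slice "west boylston" none (some (PySem.Str.len "west boylston" - 9)) = "west" := by decide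
        have hB : normalize_town_name_py_alt town = "West Boylston" := by
          unfold normalize_town_name_py_alt
          rw [if_neg h0, h8]
          simp only [eF, eT, if_true, Bool.false_eq_true, if_false, if_pos sT]
        have hA : normalize_town_name_py town = "West Boylston" := by
          simp [normalize_town_name_py, h0, hc', townMapA_eq, caseLoopA, h8,
            lowA1, lowA2, lowA3, lowA4, lowA5, lowA6, lowA7, lowA8]
        rw [hA, hB]
      -- all eight lowered variants are ruled out: A returns town, and B's prefix
      -- lookup must miss as well
      have hA : normalize_town_name_py town = town := by
        simp [normalize_town_name_py, h0, hc', townMapA_eq, caseLoopA,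
          lowA1, lowA2, lowA3, lowA4, lowA5, lowA6, lowA7, lowA8,
          h1, h2, h3, h4, h5, h6, h7, h8]
      rw [hA]
      unfold normalize_town_name_py_alt
      rw [if_neg h0]
      by_cases eb : PySem.Str.endswith (PySem.Str.lower town) " brookfield" = true
      · have hsuf : (" brookfield" : String).toList <:+ (PySem.Str.lower town).toList :=
          (PySem.Chars.endswith_iff _ _).mp (by rw [← PySem.Str.endswith_eq]; exact eb)
        obtain ⟨p, hp⟩ := hsuf
        have hp' : (PySem.Str.lower town).toList = p ++ (" brookfield" : String).toList := hp.symm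
        have hsl : (PySem.Str.slice (PySem.Str.lower town) none
            (some (PySem.Str.len (PySem.Str.lower town) - 11))).toList = p := by
          have h11 : (((" brookfield" : String).toList.length : Nat) : Int) = 11 := by decide
          have hs := sliceSuffix (PySem.Str.lower town) (" brookfield").toList p hp'
          rwa [h11] at hs
        rw [if_pos eb, getNoneB _
          (key_ne _ _ _ hp' "e" "e brookfield" (by decide) h1 _ hsl)
          (key_ne _ _ _ hp' "east" "east brookfield" (by decide) h5 _ hsl)
          (key_ne _ _ _ hp' "w" "w brookfield" (by decide) h2 _ hsl)
          (key_ne _ _ _ hp' "west" "west brookfield" (by decide) h6 _ hsl)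
          (key_ne _ _ _ hp' "n" "n brookfield" (by decide) h3 _ hsl)
          (key_ne _ _ _ hp' "north" "north brookfield" (by decide) h7 _ hsl)]
        rfl
      · by_cases eb2 : PySem.Str.endswith (PySem.Str.lower town) " boylston" = true
        · have hsuf : (" boylston" : String).toList <:+ (PySem.Str.lower town).toList :=
            (PySem.Chars.endswith_iff _ _).mp (by rw [← PySem.Str.endswith_eq]; exact eb2)
          obtain ⟨p, hp⟩ := hsuf
          have hp' : (PySem.Str.lower town).toList = p ++ (" boylston" : String).toList := hp.symm
          have hsl : (PySem.Str.slice (PySem.Str.lower town) none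
              (some (PySem.Str.len (PySem.Str.lower town) - 9))).toList = p := by
            have h9 : (((" boylston" : String).toList.length : Nat) : Int) = 9 := by decide
            have hs := sliceSuffix (PySem.Str.lower town) (" boylston").toList p hp'
            rwa [h9] at hs
          have hor : ¬(PySem.Str.slice (PySem.Str.lower town) none
                (some (PySem.Str.len (PySem.Str.lower town) - 9)) = "w" ∨
              PySem.Str.slice (PySem.Str.lower town) none
                (some (PySem.Str.len (PySem.Str.lower town) - 9)) = "west") := by
            rintro (h | h)
            · exact key_ne _ _ _ hp' "w" "w boylston" (by decide) h4 _ hsl h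
            · exact key_ne _ _ _ hp' "west" "west boylston" (by decide) h8 _ hsl h
          rw [if_neg eb, if_pos eb2, if_neg hor]
        · rw [if_neg eb, if_neg eb2]
-- ===== VERDICT =====
theorem normalize_town_name_py_spec : Claim_equal_normalize_town_name_py := by
  intro town _
  exact main_eq town
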